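-- pv_equiv track=rewrite | github.com/eMulebb/eMule-tooling | helpers/rc-string-table.py | accelerator_counts
-- ===== SOURCE A (Python) =====
-- def accelerator_counts(value: str) -> tuple[int, int]:
--     """Return mnemonic and literal ampersand counts for a resource string."""
--
--     mnemonics = 0
--     literals = 0
--     index = 0
--     while index < len(value):
--         if value[index] != "&":
--             index += 1
--             continue
--         if index + 1 < len(value) and value[index + 1] == "&":
--             literals += 1
--             index += 2
--         else:
--             mnemonics += 1
--             index += 1
--     return mnemonics, literals
-- ===== SOURCE B (Python) =====
-- def accelerator_counts(value: str) -> tuple[int, int]: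
--     """Return mnemonic and literal ampersand counts for a resource string."""
--
--     literals = value.count("&&")
--     mnemonics = value.count("&") - 2 * literals
--     return mnemonics, literals
-- ===== Notes on version B (the rewrite author's own statement) =====
-- stated objective: simpler
-- what changed: Replaces the explicit index/state-machine loop with two non-overlapping str.count library scans plus arithmetic: literals = count of the double-ampersand substring, mnemonics = count of single ampersands minus twice that.
import Mathlib
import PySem

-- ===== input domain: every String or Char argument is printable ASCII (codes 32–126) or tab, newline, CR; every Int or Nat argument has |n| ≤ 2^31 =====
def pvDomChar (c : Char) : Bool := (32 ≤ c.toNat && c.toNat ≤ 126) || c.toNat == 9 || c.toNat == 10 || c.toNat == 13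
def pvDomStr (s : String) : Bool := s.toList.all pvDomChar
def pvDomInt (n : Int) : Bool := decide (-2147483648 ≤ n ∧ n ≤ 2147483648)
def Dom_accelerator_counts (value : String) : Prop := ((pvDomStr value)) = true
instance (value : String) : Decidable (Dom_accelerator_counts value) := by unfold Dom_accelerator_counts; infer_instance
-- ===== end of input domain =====

-- B replaces A's per-character index/state-machine loop with two non-overlapping str.count scans
-- plus arithmetic (objective: simpler).

-- ===== PORT A =====
-- the while loop: index walks the string, branching on value[index] and value[index+1]
def acGo : List Char → Int → Int → Int × Int
  | [], m, l => (m, l)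
  | c :: rest, m, l =>
    if c != '&' then acGo rest m l
    else if rest.head? == some '&' then acGo rest.tail m (l + 1)
    else acGo rest (m + 1) l
  termination_by cs => cs.length
  decreasing_by all_goals (simp [List.length_tail]; try omega)

def accelerator_counts (value : String) : Int × Int :=
  acGo value.toList 0 0

-- ===== PORT B =====
def accelerator_counts_alt (value : String) : Int × Int :=
  let literals : Int := (PySem.Str.count value "&&" : Int)
  let mnemonics : Int := (PySem.Str.count value "&" : Int) - 2 * literals
  (mnemonics, literals)

-- ===== PRECONDITION & SPEC =====
def Spec_accelerator_counts (value : String) (out : Int × Int) : Prop := out = accelerator_counts_alt value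
instance (value : String) (out : Int × Int) : Decidable (Spec_accelerator_counts value out) := by unfold Spec_accelerator_counts; infer_instance

-- ===== CLAIM (what is proved, stated in full; the proofs are below) =====
def Claim_equal_accelerator_counts : Prop := ∀ (value : String), Dom_accelerator_counts value → Spec_accelerator_counts value (accelerator_counts value)

-- ===== LEMMAS AND PROOFS =====

theorem go_nil (sub : List Char) (f acc : Nat) :
    PySem.Chars.count.go sub f [] acc = acc := by
  cases f <;> simp [PySem.Chars.count.go]

theorem go_zero (sub : List Char) (cs : List Char) (acc : Nat) :
    PySem.Chars.count.go sub 0 cs acc = acc := by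
  cases cs <;> simp [PySem.Chars.count.go]

theorem go_cons (sub : List Char) (f : Nat) (c : Char) (t : List Char) (acc : Nat) :
    PySem.Chars.count.go sub (f + 1) (c :: t) acc =
      (if sub.isPrefixOf (c :: t) then
        PySem.Chars.count.go sub f (List.drop sub.length (c :: t)) (acc + 1)
      else PySem.Chars.count.go sub f t acc) := by
  simp [PySem.Chars.count.go]

theorem go_acc (sub : List Char) (f : Nat) (cs : List Char) (acc : Nat) :
    PySem.Chars.count.go sub f cs acc = acc + PySem.Chars.count.go sub f cs 0 := by
  induction f generalizing cs acc with
  | zero => simp [go_zero]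
  | succ f ih =>
    cases cs with
    | nil => simp [go_nil]
    | cons c t =>
      rw [go_cons, go_cons]
      split
      · rw [ih _ (acc + 1), ih _ (0 + 1)]; omega
      · rw [ih _ acc]

theorem go_fuel (sub : List Char) (hsub : sub ≠ []) :
    ∀ (f1 f2 : Nat) (cs : List Char), cs.length ≤ f1 → cs.length ≤ f2 →
      PySem.Chars.count.go sub f1 cs 0 = PySem.Chars.count.go sub f2 cs 0 := by
  intro f1
  induction f1 with
  | zero =>
    intro f2 cs h1 _
    have : cs = [] := List.eq_nil_of_length_eq_zero (Nat.le_zero.mp h1)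
    subst this; simp [go_nil]
  | succ f1 ih =>
    intro f2 cs h1 h2
    cases cs with
    | nil => simp [go_nil]
    | cons c t =>
      cases f2 with
      | zero => simp at h2
      | succ f2 =>
        rw [go_cons, go_cons]
        have hlen : 1 ≤ sub.length := by
          cases sub with
          | nil => exact absurd rfl hsub
          | cons a b => simp
        simp only [List.length_cons] at h1 h2
        split
        · rw [go_acc _ _ _ (0 + 1), go_acc sub f2 _ (0 + 1)]
          congr 1
          apply ih <;> (simp only [List.length_drop, List.length_cons]; omega)
        · apply ih <;> omega

-- closed characterisations of the two counts A's loop maintains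
theorem acGo_eq (f : Nat) :
    ∀ (cs : List Char) (m l : Int), cs.length ≤ f →
      acGo cs m l =
        (m + (PySem.Chars.count.go ['&'] f cs 0 : Int)
           - 2 * (PySem.Chars.count.go ['&', '&'] f cs 0 : Int),
         l + (PySem.Chars.count.go ['&', '&'] f cs 0 : Int)) := by
  induction f with
  | zero =>
    intro cs m l h
    have : cs = [] := List.eq_nil_of_length_eq_zero (Nat.le_zero.mp h)
    subst this; simp [acGo, go_nil]
  | succ f ih =>
    intro cs m l h
    cases cs with
    | nil => simp [acGo, go_nil]
    | cons c t =>
      by_cases hc : c = '&'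
      · subst hc
        cases t with
        | nil =>
          simp [acGo, go_cons, go_nil, List.isPrefixOf]
        | cons c2 t2 =>
          by_cases hc2 : c2 = '&'
          · subst hc2
            have hstep : acGo ('&' :: '&' :: t2) m l = acGo t2 m (l + 1) := by
              simp [acGo]
            rw [hstep]
            have h2 : t2.length ≤ f := by simp at h; omega
            rw [ih t2 m (l + 1) h2]
            have e2 : (PySem.Chars.count.go ['&', '&'] (f + 1) ('&' :: '&' :: t2) 0 : Nat)
                = 1 + PySem.Chars.count.go ['&', '&'] f t2 0 := by
              rw [go_cons]
              simp [List.isPrefixOf]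
              rw [go_acc _ _ _ 1]
            have e1 : (PySem.Chars.count.go ['&'] (f + 1) ('&' :: '&' :: t2) 0 : Nat)
                = 2 + PySem.Chars.count.go ['&'] f t2 0 := by
              rw [go_cons]
              simp [List.isPrefixOf]
              rw [go_acc _ _ _ 1]
              have hmid : PySem.Chars.count.go ['&'] f ('&' :: t2) 0
                  = PySem.Chars.count.go ['&'] (t2.length + 1) ('&' :: t2) 0 := by
                apply go_fuel _ (by simp) <;> (simp at h ⊢ <;> omega)
              rw [hmid, go_cons]
              simp [List.isPrefixOf]
              rw [go_acc _ _ _ 1]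
              have hback : PySem.Chars.count.go ['&'] t2.length t2 0
                  = PySem.Chars.count.go ['&'] f t2 0 := by
                apply go_fuel _ (by simp) <;> (simp at h ⊢ <;> omega)
              omega
            rw [e1, e2]
            push_cast
            rw [Prod.ext_iff]
            constructor <;> (simp; try ring)
          · have hstep : acGo ('&' :: c2 :: t2) m l = acGo (c2 :: t2) (m + 1) l := by
              simp [acGo, hc2]
            rw [hstep]
            have h2 : (c2 :: t2).length ≤ f := by simp at h ⊢; omega
            rw [ih (c2 :: t2) (m + 1) l h2]
            have e2 : (PySem.Chars.count.go ['&', '&'] (f + 1) ('&' :: c2 :: t2) 0 : Nat)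
                = PySem.Chars.count.go ['&', '&'] f (c2 :: t2) 0 := by
              rw [go_cons]; simp [List.isPrefixOf, Ne.symm hc2]
            have e1 : (PySem.Chars.count.go ['&'] (f + 1) ('&' :: c2 :: t2) 0 : Nat)
                = 1 + PySem.Chars.count.go ['&'] f (c2 :: t2) 0 := by
              rw [go_cons]
              simp [List.isPrefixOf]
              rw [go_acc _ _ _ 1]
            rw [e1, e2]
            push_cast
            rw [Prod.ext_iff]
            constructor <;> (simp; try ring)
      · have hstep : acGo (c :: t) m l = acGo t m l := by
          simp [acGo, hc]
        rw [hstep]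
        have h2 : t.length ≤ f := by simp at h; omega
        rw [ih t m l h2]
        have e2 : (PySem.Chars.count.go ['&', '&'] (f + 1) (c :: t) 0 : Nat)
            = PySem.Chars.count.go ['&', '&'] f t 0 := by
          rw [go_cons]; simp [List.isPrefixOf, Ne.symm hc]
        have e1 : (PySem.Chars.count.go ['&'] (f + 1) (c :: t) 0 : Nat)
            = PySem.Chars.count.go ['&'] f t 0 := by
          rw [go_cons]; simp [List.isPrefixOf, Ne.symm hc]
        rw [e1, e2]

-- ===== VERDICT (by name: the statement is the Claim_ definition above) =====
theorem accelerator_counts_spec : Claim_equal_accelerator_counts := by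
  intro value _
  unfold Spec_accelerator_counts accelerator_counts accelerator_counts_alt
  rw [acGo_eq value.toList.length value.toList 0 0 le_rfl]
  simp [PySem.Str.count_eq, PySem.Chars.count]
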